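-- pv_equiv track=rewrite | github.com/pando4kaa/netscout | src/analysis/normalizer.py | normalize_ips
-- ===== SOURCE A (Python) =====
-- from typing import List, Optional, Set
--
-- def normalize_ips(ips: List[str]) -> List[str]:
--     """Deduplicate IP list."""
--     seen: Set[str] = set()
--     result: List[str] = []
--     for ip in ips:
--         ip = ip.strip()
--         if ip and ip not in seen:
--             seen.add(ip)
--             result.append(ip)
--     return sorted(result)
-- ===== SOURCE B (Python) =====
-- from typing import List
--
-- def normalize_ips(ips: List[str]) -> List[str]:
--     """Deduplicate IP list: sort the stripped non-empty entries, then drop adjacent duplicates."""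
--     cleaned: List[str] = []
--     for ip in ips:
--         ip = ip.strip()
--         if ip:
--             cleaned.append(ip)
--     cleaned.sort()
--     out: List[str] = []
--     for ip in cleaned:
--         if not out or out[-1] != ip:
--             out.append(ip)
--     return out
-- ===== Notes on version B (the rewrite author's own statement) =====
-- stated objective: alternative
-- what changed: Replaces the hash-set dedup-then-sort (seen set + order-preserving result list, sorted at the end) with sort-then-adjacent-unique: strip and filter, sort with duplicates, then one linear pass keeping an element only when it differs from the previously kept one (out[-1]).
import Mathlib
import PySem

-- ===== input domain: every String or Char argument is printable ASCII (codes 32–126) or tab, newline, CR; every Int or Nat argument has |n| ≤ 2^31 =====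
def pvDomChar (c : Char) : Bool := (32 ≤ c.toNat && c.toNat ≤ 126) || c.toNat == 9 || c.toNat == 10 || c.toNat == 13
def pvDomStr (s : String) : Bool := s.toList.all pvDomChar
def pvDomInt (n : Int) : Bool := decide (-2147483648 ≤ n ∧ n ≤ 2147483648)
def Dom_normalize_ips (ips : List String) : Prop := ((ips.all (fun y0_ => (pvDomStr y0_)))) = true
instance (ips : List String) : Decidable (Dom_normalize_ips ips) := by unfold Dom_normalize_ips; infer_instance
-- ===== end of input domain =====

-- B replaces A's hash-set dedup followed by a sort with sort-then-adjacent-unique (an out[-1] scan);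
-- same return value, no 'seen' set maintained (objective: alternative).

-- ===== PORT A =====
-- loop body of A: ip = ip.strip(); if ip and ip not in seen: seen.add(ip); result.append(ip)
def pvStepA (acc : PySem.Set String × List String) (ip0 : String) : PySem.Set String × List String :=
  let ip := PySem.Str.strip ip0
  if ip ≠ "" ∧ PySem.Set.contains acc.1 ip = false then
    (PySem.Set.add acc.1 ip, acc.2 ++ [ip])
  else acc

def normalize_ips (ips : List String) : List String :=
  PySem.List.sorted (ips.foldl pvStepA ([], [])).2 (fun x => x)

-- ===== PORT B =====
-- first loop of B: ip = ip.strip(); if ip: cleaned.append(ip)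
def pvStepB1 (acc : List String) (ip0 : String) : List String :=
  let ip := PySem.Str.strip ip0
  if ip ≠ "" then acc ++ [ip] else acc

-- second loop of B: if not out or out[-1] != ip: out.append(ip)
def pvStepB2 (out : List String) (ip : String) : List String :=
  if out = [] ∨ PySem.List.pyGetD out (-1) "" ≠ ip then out ++ [ip] else out

def normalize_ips_alt (ips : List String) : List String :=
  let cleaned := ips.foldl pvStepB1 []
  let cleaned := PySem.List.sorted cleaned (fun x => x)
  cleaned.foldl pvStepB2 []

-- ===== PRECONDITION & SPEC =====
def Spec_normalize_ips (ips : List String) (out : List String) : Prop := out = normalize_ips_alt ips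
instance (ips : List String) (out : List String) : Decidable (Spec_normalize_ips ips out) := by unfold Spec_normalize_ips; infer_instance

-- ===== CLAIM (what is proved, stated in full; the proofs are below) =====
def Claim_equal_normalize_ips : Prop := ∀ (ips : List String), Dom_normalize_ips ips → Spec_normalize_ips ips (normalize_ips ips)

-- ===== LEMMAS AND PROOFS =====

-- A's loop: 'seen' and 'result' always hold the same list, namely the Set.add-fold
-- of the stripped non-empty entries.
theorem normalize_ips_loopA (ips : List String) (s : PySem.Set String) :
    ips.foldl pvStepA (s, s)
    = (let t := ((ips.map PySem.Str.strip).filter (fun x => x ≠ "")).foldl PySem.Set.add s; (t, t)) := by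
  induction ips generalizing s with
  | nil => simp
  | cons ip0 rest ih =>
    simp only [List.foldl_cons, List.map_cons, List.filter_cons]
    by_cases h1 : PySem.Str.strip ip0 = ""
    · have hstep : pvStepA (s, s) ip0 = (s, s) := by simp [pvStepA, h1]
      rw [hstep, ih]
      simp [h1]
    · by_cases h2 : PySem.Str.strip ip0 ∈ s
      · have hstep : pvStepA (s, s) ip0 = (s, s) := by
          simp [pvStepA, h1, h2]
        have hadd : PySem.Set.add s (PySem.Str.strip ip0) = s := by
          simp [PySem.Set.add, h2]
        rw [hstep, ih]
        simp only [h1, decide_not, decide_false, Bool.not_false, if_pos, List.foldl_cons, hadd]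
      · have hstep : pvStepA (s, s) ip0
            = (PySem.Set.add s (PySem.Str.strip ip0), PySem.Set.add s (PySem.Str.strip ip0)) := by
          simp [pvStepA, h1, h2]
        rw [hstep, ih]
        simp only [h1, decide_not, decide_false, Bool.not_false, if_pos, List.foldl_cons]

-- B's second loop on a (≤)-sorted list: 'out' stays strictly increasing and
-- collects exactly the members of the accumulator and of the scanned list.
theorem normalize_ips_loopB (ys : List String) :
    ∀ (acc : List String), List.Pairwise (· ≤ ·) ys → List.Pairwise (· < ·) acc →
      (∀ a ∈ acc, ∀ b ∈ ys, a ≤ b) →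
      (List.Pairwise (· < ·) (ys.foldl pvStepB2 acc)
      ∧ ∀ x, x ∈ ys.foldl pvStepB2 acc ↔ x ∈ acc ∨ x ∈ ys) := by
  induction ys with
  | nil => intro acc _ hacc _; exact ⟨hacc, by simp⟩
  | cons y t ih =>
    intro acc hys hacc hle
    have hyt : ∀ b ∈ t, y ≤ b := fun b hb => (List.pairwise_cons.mp hys).1 b hb
    have hts : List.Pairwise (· ≤ ·) t := (List.pairwise_cons.mp hys).2
    simp only [List.foldl_cons]
    by_cases hnil : acc = []
    · subst hnil
      have hstep : pvStepB2 [] y = [y] := by simp [pvStepB2]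
      rw [hstep]
      have := ih [y] hts (by simp) (by simpa using hyt)
      refine ⟨this.1, fun x => ?_⟩
      rw [this.2 x]; simp
    · have hlast : PySem.List.pyGetD acc (-1) "" = acc.getLast hnil :=
        PySem.List.pyGetD_neg_one acc "" hnil
      have hdecomp : acc.dropLast ++ [acc.getLast hnil] = acc := List.dropLast_append_getLast hnil
      have hmax : ∀ a ∈ acc, a ≤ acc.getLast hnil := by
        intro a ha
        rw [← hdecomp] at hacc ha
        rcases List.mem_append.mp ha with h | h
        · exact le_of_lt ((List.pairwise_append.mp hacc).2.2 a h _ (by simp))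
        · simp at h; simp [h]
      by_cases heq : acc.getLast hnil = y
      · -- duplicate of the previously kept element: out unchanged
        have hstep : pvStepB2 acc y = acc := by simp [pvStepB2, hnil, hlast, heq]
        rw [hstep]
        have hle' : ∀ a ∈ acc, ∀ b ∈ t, a ≤ b := fun a ha b hb =>
          le_trans (hle a ha y (by simp)) (hyt b hb)
        have := ih acc hts hacc hle'
        refine ⟨this.1, fun x => ?_⟩
        rw [this.2 x]
        constructor
        · rintro (h | h)
          · exact Or.inl h
          · exact Or.inr (List.mem_cons_of_mem _ h)
        · rintro (h | h)
          · exact Or.inl h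
          · rcases List.mem_cons.mp h with h | h
            · exact Or.inl (h ▸ heq ▸ List.getLast_mem hnil)
            · exact Or.inr h
      · -- new value: append
        have hstep : pvStepB2 acc y = acc ++ [y] := by simp [pvStepB2, hnil, hlast, heq]
        rw [hstep]
        have hlt : ∀ a ∈ acc, a < y := by
          intro a ha
          rcases lt_or_eq_of_le (hle a ha y (by simp)) with h | h
          · exact h
          · exfalso
            have h1 : acc.getLast hnil ≤ y := hle _ (List.getLast_mem hnil) y (by simp)
            have h2 : y ≤ acc.getLast hnil := h ▸ hmax a ha
            exact heq (le_antisymm h1 h2)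
        have hacc' : List.Pairwise (· < ·) (acc ++ [y]) := by
          rw [List.pairwise_append]
          exact ⟨hacc, by simp, by simpa using hlt⟩
        have hle' : ∀ a ∈ acc ++ [y], ∀ b ∈ t, a ≤ b := by
          intro a ha b hb
          rcases List.mem_append.mp ha with h | h
          · exact le_trans (hle a h y (by simp)) (hyt b hb)
          · simp at h; exact h ▸ hyt b hb
        have := ih (acc ++ [y]) hts hacc' hle'
        refine ⟨this.1, fun x => ?_⟩
        rw [this.2 x]
        simp [or_assoc, or_comm, or_left_comm]

-- ===== VERDICT (by name: the statement is the Claim_ definition above) =====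
theorem normalize_ips_spec : Claim_equal_normalize_ips := by
  intro ips _
  unfold Spec_normalize_ips normalize_ips normalize_ips_alt
  set fs := (ips.map PySem.Str.strip).filter (fun x => x ≠ "") with hfs
  -- A's result list is Set.ofList fs
  have hA : (ips.foldl pvStepA ([], [])).2 = PySem.Set.ofList fs := by
    rw [normalize_ips_loopA ips []]
    rw [PySem.Set.ofList_eq_foldl]
  -- B's cleaned list is fs
  have hB : ips.foldl pvStepB1 [] = fs := by
    have h : pvStepB1 = fun acc ip0 =>
        if (fun x => decide (PySem.Str.strip x ≠ "")) ip0 then acc ++ [PySem.Str.strip ip0] else acc := by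
      funext acc ip0; simp [pvStepB1]
    rw [h, PySem.List.foldl_append_if (fun x => decide (PySem.Str.strip x ≠ "")) PySem.Str.strip ips []]
    rw [hfs, List.filter_map]
    simp [Function.comp_def]
  rw [hA, hB]
  -- adjacent-unique over sorted fs equals sorted (Set.ofList fs)
  have hsp : List.Pairwise (· ≤ ·) (PySem.List.sorted fs (fun x => x)) := by
    simpa using PySem.List.sorted_pairwise fs (fun x => x)
  obtain ⟨hlt, hmem⟩ := normalize_ips_loopB (PySem.List.sorted fs (fun x => x)) [] hsp
    (by simp) (by simp)
  apply PySem.List.sorted_eq_of_perm_of_pairwise_lt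
  · rw [List.perm_ext_iff_of_nodup (show List.Nodup _ from hlt.imp ne_of_lt) (PySem.Set.nodup_ofList fs)]
    intro a
    rw [hmem a, PySem.Set.mem_ofList]
    simp [PySem.List.mem_sorted]
  · simpa using hlt
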